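-- pv_equiv track=rewrite | github.com/NoureldinAyman/Graph-Coloring | GraphColoringTerminal.py | validate_adjacency_matrix
-- ===== SOURCE A (Python) =====
-- def validate_adjacency_matrix(matrix):
--     # Check if the matrix is square
--     num_rows = len(matrix)
--     for row in matrix:
--         if len(row) != num_rows:
--             return False
--
--     # Check if all entries are either 0 or 1, and if the matrix is symmetric
--     for i in range(num_rows):
--         for j in range(num_rows):
--             if matrix[i][j] not in [0, 1]:
--                 return False
--             if matrix[i][j] != matrix[j][i]:
--                 return False
--
--     return True
-- ===== SOURCE B (Python) =====
-- def validate_adjacency_matrix(matrix):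
--     n = len(matrix)
--     if any(len(row) != n for row in matrix):
--         return False
--     if not all(x in (0, 1) for row in matrix for x in row):
--         return False
--     transpose = [[row[i] for row in matrix] for i in range(n)]
--     return matrix == transpose
-- ===== Notes on version B (the rewrite author's own statement) =====
-- stated objective: idiomatic
-- what changed: Replaces A's index-based double loop (which rechecks binary-ness and symmetry per index pair) with three separate whole-matrix passes: an any() squareness test, an all() binary test over the elements, and a symmetry test by materialising the transpose and comparing it to the matrix.
import Mathlib
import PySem

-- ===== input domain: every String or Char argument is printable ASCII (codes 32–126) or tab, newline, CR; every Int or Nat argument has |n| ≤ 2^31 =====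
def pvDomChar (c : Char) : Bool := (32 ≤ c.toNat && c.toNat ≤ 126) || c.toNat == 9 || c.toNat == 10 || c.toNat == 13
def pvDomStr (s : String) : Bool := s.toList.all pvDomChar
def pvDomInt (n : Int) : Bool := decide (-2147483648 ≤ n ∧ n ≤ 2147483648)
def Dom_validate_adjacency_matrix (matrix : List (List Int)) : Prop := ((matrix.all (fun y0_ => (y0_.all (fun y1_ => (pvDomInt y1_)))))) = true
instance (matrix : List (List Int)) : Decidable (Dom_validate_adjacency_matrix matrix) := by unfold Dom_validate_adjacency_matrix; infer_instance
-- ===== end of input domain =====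

-- B replaces A's index-based double loop by three whole-matrix passes (squareness, binary elements,
-- symmetry via an explicit transpose compared to the matrix); same cost, more idiomatic.

-- ===== PORT A =====
-- the `for row in matrix: if len(row) != num_rows: return False` loop = List.all;
-- the nested `for i in range(num_rows): for j in range(num_rows): if …: return False` loops = all over pyRange;
-- matrix[i][j] is always in range once the square check passed, so pyGetD is exact here.
def validate_adjacency_matrix (matrix : List (List Int)) : Bool :=
  let num_rows := matrix.length
  if matrix.all (fun row => row.length == num_rows) then
    (PySem.List.pyRange 0 num_rows 1).all (fun i =>
      (PySem.List.pyRange 0 num_rows 1).all (fun j =>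
        let mij := PySem.List.pyGetD (PySem.List.pyGetD matrix i []) j 0
        let mji := PySem.List.pyGetD (PySem.List.pyGetD matrix j []) i 0
        (mij == 0 || mij == 1) && mij == mji))
  else false

-- ===== PORT B =====
-- row[i] in the transpose comprehension is only evaluated after the square check, so i < row.length
-- and List.getD is exact there.
def validate_adjacency_matrix_alt (matrix : List (List Int)) : Bool :=
  let n := matrix.length
  if matrix.any (fun row => row.length != n) then false
  else if !(matrix.all (fun row => row.all (fun x => x == 0 || x == 1))) then false
  else matrix == (List.range n).map (fun i => matrix.map (fun row => row.getD i 0))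

-- ===== PRECONDITION & SPEC =====
def Spec_validate_adjacency_matrix (matrix : List (List Int)) (out : Bool) : Prop := out = validate_adjacency_matrix_alt matrix
instance (matrix : List (List Int)) (out : Bool) : Decidable (Spec_validate_adjacency_matrix matrix out) := by unfold Spec_validate_adjacency_matrix; infer_instance

-- ===== CLAIM (what is proved, stated in full; the proofs are below) =====
def Claim_equal_validate_adjacency_matrix : Prop := ∀ (matrix : List (List Int)), Dom_validate_adjacency_matrix matrix → Spec_validate_adjacency_matrix matrix (validate_adjacency_matrix matrix)

-- ===== LEMMAS AND PROOFS =====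

-- On a square matrix, A's nested index check is equivalent to B's "binary ∧ matrix = transpose".
theorem body_equiv (matrix : List (List Int))
    (hsq : ∀ row ∈ matrix, row.length = matrix.length) :
    ((PySem.List.pyRange 0 matrix.length 1).all (fun i =>
      (PySem.List.pyRange 0 matrix.length 1).all (fun j =>
        let mij := PySem.List.pyGetD (PySem.List.pyGetD matrix i []) j 0
        let mji := PySem.List.pyGetD (PySem.List.pyGetD matrix j []) i 0
        (mij == 0 || mij == 1) && mij == mji)))
    = ((matrix.all (fun row => row.all (fun x => x == 0 || x == 1))) &&
       (matrix == (List.range matrix.length).map (fun i => matrix.map (fun row => row.getD i 0)))) := by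
  have hrowlen : ∀ (i : Nat) (hi : i < matrix.length), matrix[i].length = matrix.length :=
    fun i hi => hsq _ (List.getElem_mem hi)
  have he : ∀ (i j : Nat) (hi : i < matrix.length) (hj : j < matrix.length),
      PySem.List.pyGetD (PySem.List.pyGetD matrix (i : Int) []) (j : Int) 0
        = matrix[i][j]'(by rw [hrowlen i hi]; exact hj) := by
    intro i j hi hj
    have h1 : PySem.List.pyGetD matrix (i : Int) [] = matrix[i] := by
      rw [PySem.List.pyGetD_natCast]; exact List.getD_eq_getElem _ _ hi
    rw [h1, PySem.List.pyGetD_natCast]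
    exact List.getD_eq_getElem _ _ (by rw [hrowlen i hi]; exact hj)
  -- symmetry ↔ transpose equality
  have hT : (matrix = (List.range matrix.length).map (fun i => matrix.map (fun row => row.getD i 0))) ↔
      (∀ (i j : Nat) (hi : i < matrix.length) (hj : j < matrix.length),
        matrix[i][j]'(by rw [hrowlen i hi]; exact hj)
          = matrix[j][i]'(by rw [hrowlen j hj]; exact hi)) := by
    constructor
    · intro h i j hi hj
      have h1 := List.getElem_of_eq h hi
      simp only [List.getElem_map, List.getElem_range] at h1
      have h2 := List.getElem_of_eq h1 (by rw [hrowlen i hi]; exact hj)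
      simp only [List.getElem_map] at h2
      rw [h2, List.getD_eq_getElem _ _ (by rw [hrowlen j hj]; exact hi)]
    · intro h
      apply List.ext_getElem (by simp)
      intro i hi hi'
      apply List.ext_getElem (by simp [hrowlen i hi])
      intro j hj hj'
      simp only [List.getElem_map, List.getElem_range]
      have hj2 : j < matrix.length := by simpa using hj'
      rw [List.getD_eq_getElem _ _ (by rw [hrowlen j hj2]; exact hi)]
      exact h i j hi hj2
  -- binary ↔ indexed binary
  have hB : (∀ row ∈ matrix, ∀ x ∈ row, x = 0 ∨ x = 1) ↔
      (∀ (i j : Nat) (hi : i < matrix.length) (hj : j < matrix.length),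
        matrix[i][j]'(by rw [hrowlen i hi]; exact hj) = 0 ∨
        matrix[i][j]'(by rw [hrowlen i hi]; exact hj) = 1) := by
    constructor
    · intro h i j hi hj
      exact h _ (List.getElem_mem hi) _ (List.getElem_mem _)
    · intro h row hr x hx
      obtain ⟨i, hi, rfl⟩ := List.mem_iff_getElem.mp hr
      obtain ⟨j, hj, rfl⟩ := List.mem_iff_getElem.mp hx
      exact h i j hi (hrowlen i hi ▸ hj)
  rw [Bool.eq_iff_iff]
  simp only [List.all_eq_true, Bool.and_eq_true, Bool.or_eq_true, beq_iff_eq,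
    PySem.List.mem_pyRange_one, List.all_eq_true]
  constructor
  · rintro h
    refine ⟨fun row hr x hx => ?_, ?_⟩
    · exact (hB.mpr (fun i j hi hj => by
        have := h (i : Int) ⟨by positivity, by exact_mod_cast hi⟩ (j : Int) ⟨by positivity, by exact_mod_cast hj⟩
        rw [he i j hi hj] at this
        exact this.1)) row hr x hx
    · refine hT.mpr (fun i j hi hj => ?_)
      have := h (i : Int) ⟨by positivity, by exact_mod_cast hi⟩ (j : Int) ⟨by positivity, by exact_mod_cast hj⟩
      rw [he i j hi hj, he j i hj hi] at this
      exact this.2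
  · rintro ⟨hbin, heq⟩ i ⟨hi0, hin⟩ j ⟨hj0, hjn⟩
    have hi' : i.toNat < matrix.length := by omega
    have hj' : j.toNat < matrix.length := by omega
    have hic : (i.toNat : Int) = i := Int.toNat_of_nonneg hi0
    have hjc : (j.toNat : Int) = j := Int.toNat_of_nonneg hj0
    rw [← hic, ← hjc, he _ _ hi' hj', he _ _ hj' hi']
    exact ⟨hB.mp hbin i.toNat j.toNat hi' hj', hT.mp heq i.toNat j.toNat hi' hj'⟩

-- ===== VERDICT (by name: the statement is the Claim_ definition above) =====
theorem validate_adjacency_matrix_spec : Claim_equal_validate_adjacency_matrix := by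
  intro matrix _
  unfold Spec_validate_adjacency_matrix validate_adjacency_matrix validate_adjacency_matrix_alt
  simp only []
  by_cases hsq : matrix.all (fun row => row.length == matrix.length)
  · have hsq' : ∀ row ∈ matrix, row.length = matrix.length := by
      intro row hr; exact beq_iff_eq.mp (List.all_eq_true.mp hsq row hr)
    have hany : matrix.any (fun row => row.length != matrix.length) = false := by
      simp only [List.any_eq_false]; intro row hr; simp [hsq' row hr]
    rw [if_pos hsq, if_neg (by simp [hany])]
    rw [body_equiv matrix hsq']
    by_cases hbin : matrix.all (fun row => row.all (fun x => x == 0 || x == 1))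
    · simp [hbin]
    · simp [hbin]
  · rw [if_neg hsq, if_pos]
    simp only [List.all_eq_true, not_forall] at hsq
    simp only [List.any_eq_true]
    obtain ⟨row, hr, hlen⟩ := hsq
    exact ⟨row, hr, by simpa using hlen⟩
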